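-- pv_equiv track=rewrite | github.com/AllexPrado/Analyst_IA | backend/utils/persona_detector.py | resumir_contexto_texto
-- ===== SOURCE A (Python) =====
-- def resumir_contexto_texto(contexto: str, persona: str) -> str:
--     """Abordagem baseada em texto para resumo quando JSON não é possível"""
--
--     # Se for contexto em markdown, extrai seções relevantes
--     linhas = contexto.split('\n')
--     resultado = []
--     secao_atual = ""
--     incluir_secao = False
--
--     # Para executivos, mantém seções de resumo e KPIs
--     executivo_keywords = ["RESUMO", "KPI", "SLA", "DISPONIBILIDADE", "NEGÓCIO"]
--     tecnico_keywords = ["ERROS", "LATÊNCIA", "PERFORMANCE", "MÉTRICAS", "TÉCNICO"]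
--
--     for linha in linhas:
--         # Detecta cabeçalhos markdown (#, ##, etc)
--         if linha.strip().startswith('#'):
--             # Termina seção anterior se existir
--             if secao_atual and incluir_secao:
--                 resultado.append(secao_atual)
--
--             # Nova seção
--             secao_atual = linha + "\n"
--             incluir_secao = False
--
--             # Verifica se a seção é relevante para a persona
--             if persona == "executivo" and any(kw in linha.upper() for kw in executivo_keywords):
--                 incluir_secao = True
--             elif persona == "tecnico" and any(kw in linha.upper() for kw in tecnico_keywords):
--                 incluir_secao = True
--             else:
--                 # Para default, inclui cabeçalhos de primeiro nível
--                 if linha.strip().startswith('# '):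
--                     incluir_secao = True
--         elif incluir_secao:
--             secao_atual += linha + "\n"
--
--     # Adiciona última seção se necessário
--     if secao_atual and incluir_secao:
--         resultado.append(secao_atual)
--
--     # Se mesmo assim for muito grande, limita ao final do texto (que geralmente tem a pergunta)
--     resumo = '\n'.join(resultado)
--     if len(resumo) > 30000:
--         return resumo[-30000:]
--     return resumo
-- ===== SOURCE B (Python) =====
-- def resumir_contexto_texto(contexto: str, persona: str) -> str:
--     """Backwards single pass: walk the lines from the end, carrying the body lines
--     seen since the last header; at each header emit the whole section at once if
--     its header matches the persona, so no inclusion flag or open-section state is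
--     threaded forward.  Return value only (no side effects)."""
--     executivo_keywords = ["RESUMO", "KPI", "SLA", "DISPONIBILIDADE", "NEG\u00d3CIO"]
--     tecnico_keywords = ["ERROS", "LAT\u00caNCIA", "PERFORMANCE", "M\u00c9TRICAS", "T\u00c9CNICO"]
--
--     def eh_cabecalho(linha):
--         return linha.strip().startswith('#')
--
--     def manter(cab):
--         maiuscula = cab.upper()
--         if persona == "executivo" and any(kw in maiuscula for kw in executivo_keywords):
--             return True
--         if persona == "tecnico" and any(kw in maiuscula for kw in tecnico_keywords):
--             return True
--         return cab.strip().startswith('# ')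
--
--     partes = []
--     corpo = []  # body lines below the current position up to the next header, bottom-up
--     for linha in reversed(contexto.split('\n')):
--         if eh_cabecalho(linha):
--             if manter(linha):
--                 partes.append(linha + '\n' + ''.join(x + '\n' for x in reversed(corpo)))
--             corpo = []
--         else:
--             corpo.append(linha)
--     partes.reverse()
--     return '\n'.join(partes)[-30000:]
-- ===== Notes on version B (the rewrite author's own statement) =====
-- stated objective: alternative
-- what changed: Replaces A's forward state machine (growing current-section string plus inclusion flag threaded through the loop, with end-of-loop flush) by a single backwards pass that carries only the body lines since the last header and emits each whole kept section at its header, then always takes the last 30000 chars via slicing.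
import Mathlib
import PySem

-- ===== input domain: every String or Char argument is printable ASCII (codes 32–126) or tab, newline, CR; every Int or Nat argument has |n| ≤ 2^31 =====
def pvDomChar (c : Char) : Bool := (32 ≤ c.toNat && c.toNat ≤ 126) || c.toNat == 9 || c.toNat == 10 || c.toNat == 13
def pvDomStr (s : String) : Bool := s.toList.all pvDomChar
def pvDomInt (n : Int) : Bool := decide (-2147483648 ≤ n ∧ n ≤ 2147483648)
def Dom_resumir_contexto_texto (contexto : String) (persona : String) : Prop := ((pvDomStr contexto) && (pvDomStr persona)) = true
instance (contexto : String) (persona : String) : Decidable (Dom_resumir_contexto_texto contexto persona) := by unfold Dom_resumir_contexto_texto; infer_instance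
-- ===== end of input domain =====

-- B replaces A's forward one-pass state machine (open-section string + inclusion flag)
-- by a single backwards pass that emits each whole section at its header; alternative
-- decomposition, same O(n) cost.

-- ===== PORT A =====
-- one step of A's for-loop over the lines; state = (resultado, secao_atual, incluir_secao)
def pvStepA (persona : String) (st : List String × String × Bool) (linha : String) :
    List String × String × Bool :=
  if PySem.Str.startswith (PySem.Str.strip linha) "#" then
    let resultado := if st.2.1 ≠ "" ∧ st.2.2 = true then st.1 ++ [st.2.1] else st.1
    let incluir :=
      if persona == "executivo" &&
          (["RESUMO", "KPI", "SLA", "DISPONIBILIDADE", "NEGÓCIO"].any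
            (fun kw => PySem.Str.isIn kw (PySem.Str.upper linha))) then true
      else if persona == "tecnico" &&
          (["ERROS", "LATÊNCIA", "PERFORMANCE", "MÉTRICAS", "TÉCNICO"].any
            (fun kw => PySem.Str.isIn kw (PySem.Str.upper linha))) then true
      else PySem.Str.startswith (PySem.Str.strip linha) "# "
    (resultado, linha ++ "\n", incluir)
  else if st.2.2 = true then (st.1, st.2.1 ++ (linha ++ "\n"), st.2.2)
  else st

def resumir_contexto_texto (contexto : String) (persona : String) : String :=
  let linhas := (PySem.Str.split? contexto "\n").getD []   -- split('\n'): sep ≠ "", never raises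
  let st := linhas.foldl (pvStepA persona) ([], "", false)
  let resultado := if st.2.1 ≠ "" ∧ st.2.2 = true then st.1 ++ [st.2.1] else st.1
  let resumo := PySem.Str.join "\n" resultado
  if 30000 < PySem.Str.len resumo then PySem.Str.slice resumo (some (-30000)) none else resumo

-- ===== PORT B =====
def pvEhCabecalho (linha : String) : Bool :=
  PySem.Str.startswith (PySem.Str.strip linha) "#"

def pvManter (persona : String) (cab : String) : Bool :=
  let maiuscula := PySem.Str.upper cab
  if persona == "executivo" &&
      (["RESUMO", "KPI", "SLA", "DISPONIBILIDADE", "NEGÓCIO"].any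
        (fun kw => PySem.Str.isIn kw maiuscula)) then true
  else if persona == "tecnico" &&
      (["ERROS", "LATÊNCIA", "PERFORMANCE", "MÉTRICAS", "TÉCNICO"].any
        (fun kw => PySem.Str.isIn kw maiuscula)) then true
  else PySem.Str.startswith (PySem.Str.strip cab) "# "

-- Source B's backwards for-loop is a foldr; python appends and finally reverses `partes`
-- (resp. reads `reversed(corpo)`), which cons realises directly, keeping both in order.
def pvStepB (persona : String) (linha : String) (st : List String × List String) :
    List String × List String :=
  if pvEhCabecalho linha then
    (if pvManter persona linha then
        (linha ++ "\n" ++ PySem.Str.join "" (st.2.map (fun x => x ++ "\n"))) :: st.1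
      else st.1, [])
  else (st.1, linha :: st.2)

def resumir_contexto_texto_alt (contexto : String) (persona : String) : String :=
  let linhas := (PySem.Str.split? contexto "\n").getD []   -- split('\n'): sep ≠ "", never raises
  let st := linhas.foldr (pvStepB persona) ([], [])
  PySem.Str.slice (PySem.Str.join "\n" st.1) (some (-30000)) none

-- ===== PRECONDITION & SPEC =====
def Spec_resumir_contexto_texto (contexto : String) (persona : String) (out : String) : Prop := out = resumir_contexto_texto_alt contexto persona
instance (contexto : String) (persona : String) (out : String) : Decidable (Spec_resumir_contexto_texto contexto persona out) := by unfold Spec_resumir_contexto_texto; infer_instance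

-- ===== CLAIM (what is proved, stated in full; the proofs are below) =====
def Claim_equal_resumir_contexto_texto : Prop := ∀ (contexto : String) (persona : String), Dom_resumir_contexto_texto contexto persona → Spec_resumir_contexto_texto contexto persona (resumir_contexto_texto contexto persona)

-- ===== LEMMAS AND PROOFS =====

theorem pvJoinEmptyCons (x : String) (xs : List String) :
    PySem.Str.join "" (x :: xs) = x ++ PySem.Str.join "" xs := by
  apply String.toList_inj.mp
  cases xs with
  | nil => simp [PySem.Str.toList_join, PySem.Chars.join_singleton, PySem.Chars.join_nil]
  | cons b t => simp [PySem.Str.toList_join, PySem.Chars.join_cons_cons]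

theorem pvSliceId (s : String) (h : ¬ 30000 < PySem.Str.len s) :
    PySem.Str.slice s (some (-30000)) none = s := by
  have hl : s.toList.length ≤ 30000 := by
    have := PySem.Str.len_eq s; omega
  apply String.toList_inj.mp
  rw [PySem.Str.toList_slice, PySem.Chars.slice_eq_listSlice,
      PySem.List.slice_from_neg_ofNat _ 30000 (by omega)]
  have hl' : s.length ≤ 30000 := by rw [← String.length_toList]; exact hl
  simp [Nat.sub_eq_zero_of_le hl']

theorem pvAppendNlNe (a : String) : a ++ "\n" ≠ "" := by
  intro h
  have := congrArg String.toList h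
  simp at this

-- A's header step, written with B's `pvManter` as the inclusion test
theorem pvStepA_hdr (persona : String) (st : List String × String × Bool) (linha : String)
    (h : PySem.Str.startswith (PySem.Str.strip linha) "#" = true) :
    pvStepA persona st linha =
      ((if st.2.1 ≠ "" ∧ st.2.2 = true then st.1 ++ [st.2.1] else st.1),
        linha ++ "\n", pvManter persona linha) := by
  simp only [pvStepA, pvManter, h, if_true]

-- the loop invariant: A's fold (from any state) against B's fold
theorem pvLoop (persona : String) (ls : List String) :
    ∀ (res : List String) (secao : String) (inc : Bool), (inc = true → secao ≠ "") →
    (let st := ls.foldl (pvStepA persona) (res, secao, inc)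
     if st.2.1 ≠ "" ∧ st.2.2 = true then st.1 ++ [st.2.1] else st.1) =
    (if inc = true then
        res ++ [secao ++ PySem.Str.join ""
          (((ls.foldr (pvStepB persona) ([], [])).2).map (fun x => x ++ "\n"))]
      else res) ++ (ls.foldr (pvStepB persona) ([], [])).1 := by
  induction ls with
  | nil =>
    intro res secao inc hne
    cases inc with
    | false => simp
    | true => simp [hne rfl, String.append_empty, PySem.Str.join]
  | cons l rest ih =>
    intro res secao inc hne
    by_cases h : pvEhCabecalho l = true
    · have hfold : (l :: rest).foldl (pvStepA persona) (res, secao, inc) =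
          rest.foldl (pvStepA persona)
            ((if secao ≠ "" ∧ inc = true then res ++ [secao] else res),
              l ++ "\n", pvManter persona l) := by
        simp only [List.foldl_cons]
        rw [pvStepA_hdr persona (res, secao, inc) l h]
      simp only [hfold]
      rw [ih _ _ _ (fun _ => pvAppendNlNe l)]
      have hres : (if secao ≠ "" ∧ inc = true then res ++ [secao] else res) =
          (if inc = true then res ++ [secao] else res) := by
        cases inc with
        | false => simp
        | true => simp [hne rfl]
      simp only [List.foldr_cons, pvStepB, h, if_true, hres]
      cases hm : pvManter persona l with
      | false =>
        cases inc with
        | false => simp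
        | true => simp [String.append_empty, PySem.Str.join]
      | true =>
        cases inc with
        | false => simp [String.append_assoc]
        | true => simp [String.append_empty, PySem.Str.join, String.append_assoc]
    · have h' : PySem.Str.startswith (PySem.Str.strip l) "#" = false := by
        simpa [pvEhCabecalho] using h
      cases inc with
      | false =>
        have hfold : (l :: rest).foldl (pvStepA persona) (res, secao, false) =
            rest.foldl (pvStepA persona) (res, secao, false) := by
          rw [List.foldl_cons, show pvStepA persona (res, secao, false) l = (res, secao, false) by
            simp only [pvStepA, h']; simp]
        simp only [hfold]
        rw [ih res secao false (by simp)]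
        simp [List.foldr_cons, pvStepB, h]
      | true =>
        have hfold : (l :: rest).foldl (pvStepA persona) (res, secao, true) =
            rest.foldl (pvStepA persona) (res, secao ++ (l ++ "\n"), true) := by
          rw [List.foldl_cons, show pvStepA persona (res, secao, true) l =
              (res, secao ++ (l ++ "\n"), true) by
            simp only [pvStepA, h']; simp]
        simp only [hfold]
        rw [ih res (secao ++ (l ++ "\n")) true
          (fun _ => by rw [← String.append_assoc]; exact pvAppendNlNe (secao ++ l))]
        simp only [List.foldr_cons, pvStepB, h, Bool.false_eq_true, if_false, if_true,
          List.map_cons, pvJoinEmptyCons, String.append_assoc]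

-- ===== VERDICT (by name: the statement is the Claim_ definition above) =====
theorem resumir_contexto_texto_spec : Claim_equal_resumir_contexto_texto := by
  intro contexto persona _
  unfold Spec_resumir_contexto_texto resumir_contexto_texto resumir_contexto_texto_alt
  have h := pvLoop persona ((PySem.Str.split? contexto "\n").getD []) [] "" false (by simp)
  simp only [Bool.false_eq_true, if_false, List.nil_append] at h
  simp only [h]
  by_cases hlen : 30000 < PySem.Str.len (PySem.Str.join "\n"
      ((((PySem.Str.split? contexto "\n").getD []).foldr (pvStepB persona) ([], [])).1))
  · rw [if_pos hlen]
  · rw [if_neg hlen]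
    exact (pvSliceId _ hlen).symm
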